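-- pv_equiv track=rewrite | github.com/hiranya911/coding-challenges | AdventOfCode2019/d17.py | encode_commands
-- ===== SOURCE A (Python) =====
-- def encode_commands(commands):
--     output = []
--     for cmd in commands:
--         s = str(cmd)
--         if output:
--             output.append(ord(','))
--         for ch in s:
--             output.append(ord(ch))
--     output.append(ord('\n'))
--     return output
-- ===== SOURCE B (Python) =====
-- def _push_digits_rev(rev, n):
--     # append the ASCII codes of str(n) in REVERSE order (least significant digit first)
--     if n < 0:
--         sign, n = True, -n
--     else:
--         sign = False
--     while True:
--         rev.append(48 + n % 10)
--         n //= 10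
--         if n == 0:
--             break
--     if sign:
--         rev.append(45)
--
--
-- def encode_commands(commands):
--     # build the whole code list back-to-front, then reverse once
--     rev = [10]
--     for cmd in reversed(commands):
--         _push_digits_rev(rev, cmd)
--         rev.append(44)
--     if commands:
--         rev.pop()  # drop the extra leading comma
--     rev.reverse()
--     return rev
-- ===== Notes on version B (the rewrite author's own statement) =====
-- stated objective: alternative
-- what changed: B never converts numbers to strings: it extracts each command's ASCII digit codes arithmetically with a divmod-10 while loop (least significant digit first) and builds the whole code list back-to-front with a comma appended after each command, dropping the extra comma and reversing once at the end, versus A's str()/ord() accumulator loop with an inline separator guard.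
import Mathlib
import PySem

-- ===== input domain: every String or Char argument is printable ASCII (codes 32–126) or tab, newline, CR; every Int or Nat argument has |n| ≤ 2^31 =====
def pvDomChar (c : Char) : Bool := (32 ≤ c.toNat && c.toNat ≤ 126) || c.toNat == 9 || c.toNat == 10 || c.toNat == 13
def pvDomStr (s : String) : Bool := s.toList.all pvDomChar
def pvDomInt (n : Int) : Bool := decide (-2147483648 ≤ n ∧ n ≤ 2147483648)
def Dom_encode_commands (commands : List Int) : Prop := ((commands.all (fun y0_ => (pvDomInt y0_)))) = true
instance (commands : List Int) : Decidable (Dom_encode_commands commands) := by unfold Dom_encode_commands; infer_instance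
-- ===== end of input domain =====

-- B computes ASCII codes arithmetically (divmod-10 digit extraction, no string conversion) and builds the whole code list back-to-front, reversing once at the end, versus A's str()/ord() accumulator loop with an inline separator guard; same cost, a genuinely different algorithm.


-- ===== PORT A =====
def encode_commands (commands : List Int) : List Int :=
  let output := commands.foldl (fun output cmd =>
    let s := PySem.Int.toChars cmd
    let output := if output ≠ [] then output ++ [((','.toNat : Nat) : Int)] else output
    s.foldl (fun output ch => output ++ [((ch.toNat : Nat) : Int)]) output) []
  output ++ [(('\n'.toNat : Nat) : Int)]

-- ===== PORT B =====
-- the while loop of _push_digits_rev; its n is a nonnegative Python int, so it is ported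
-- on Nat (divmod with nonnegative dividend and divisor 10 is exactly Nat div/mod: exact here)
def pvPushLoop (n : Nat) (rev : List Int) : List Int :=
  if n / 10 = 0 then rev ++ [48 + ((n % 10 : Nat) : Int)]
  else pvPushLoop (n / 10) (rev ++ [48 + ((n % 10 : Nat) : Int)])
decreasing_by exact Nat.div_lt_self (by omega) (by norm_num)

-- _push_digits_rev (returns the extended list instead of mutating its argument)
def pvPushDigitsRev (rev : List Int) (n : Int) : List Int :=
  let rev := pvPushLoop (if n < 0 then -n else n).toNat rev
  if n < 0 then rev ++ [45] else rev

def encode_commands_alt (commands : List Int) : List Int :=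
  let rev := commands.reverse.foldl (fun rev cmd => pvPushDigitsRev rev cmd ++ [44]) [10]
  let rev := if commands ≠ [] then rev.dropLast else rev
  rev.reverse

-- ===== PRECONDITION & SPEC =====
def Spec_encode_commands (commands : List Int) (out : List Int) : Prop := out = encode_commands_alt commands
instance (commands : List Int) (out : List Int) : Decidable (Spec_encode_commands commands out) := by unfold Spec_encode_commands; infer_instance

-- ===== CLAIM =====
def Claim_equal_encode_commands : Prop := ∀ (commands : List Int), Dom_encode_commands commands → Spec_encode_commands commands (encode_commands commands)

-- ===== LEMMAS AND PROOFS =====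

def pvOrd (ch : Char) : Int := ((ch.toNat : Nat) : Int)

-- spec helper: the ASCII codes of the decimal digits of n, most significant first
def pvDigitsNonneg (n : Nat) : List Int :=
  if n < 10 then [48 + (n : Int)]
  else pvDigitsNonneg (n / 10) ++ [48 + ((n % 10 : Nat) : Int)]
decreasing_by exact Nat.div_lt_self (by omega) (by norm_num)

-- spec helper: the ASCII codes of str(n)
def pvDigits (n : Int) : List Int :=
  if n < 0 then 45 :: pvDigitsNonneg (-n).toNat else pvDigitsNonneg n.toNat

-- ---- A-side characterisation ----

-- the accumulator of toDigitsCore never shrinks (used to show str(n) is nonempty)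
lemma toDigitsCore_length_le (b : Nat) :
    ∀ (f n : Nat) (l : List Char), l.length ≤ (Nat.toDigitsCore b f n l).length := by
  intro f
  induction f with
  | zero => intro n l; simp [Nat.toDigitsCore]
  | succ f ih =>
    intro n l
    simp only [Nat.toDigitsCore]
    split
    · simp
    · exact le_trans (by simp) (ih (n / b) (Nat.digitChar (n % b) :: l))

lemma toChars_ne_nil (n : Int) : PySem.Int.toChars n ≠ [] := by
  unfold PySem.Int.toChars
  split
  · simp
  · unfold Nat.toDigits
    intro h
    simp only [Nat.toDigitsCore] at h
    split at h
    · simp at h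
    · have := toDigitsCore_length_le 10 (n.toNat) (n.toNat / 10) [Nat.digitChar (n.toNat % 10)]
      rw [h] at this
      simp at this

lemma foldl_snoc_map (f : Char → Int) :
    ∀ (s : List Char) (o : List Int),
      s.foldl (fun o ch => o ++ [f ch]) o = o ++ s.map f := by
  intro s
  induction s with
  | nil => simp
  | cons c cs ih => intro o; simp [ih]

def pvStep (output : List Int) (cmd : Int) : List Int :=
  List.foldl (fun output ch => output ++ [((ch.toNat : Nat) : Int)])
    (if output ≠ [] then output ++ [(44 : Int)] else output) (PySem.Int.toChars cmd)

lemma foldl_step_nonempty :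
    ∀ (cmds : List Int) (acc : List Int), acc ≠ [] →
      cmds.foldl pvStep acc
      = acc ++ cmds.flatMap (fun c => (44 : Int) :: (PySem.Int.toChars c).map pvOrd) := by
  intro cmds
  induction cmds with
  | nil => intro acc _; simp
  | cons c cs ih =>
    intro acc hacc
    simp only [List.foldl_cons]
    have h1 : pvStep acc c = acc ++ [(44 : Int)] ++ (PySem.Int.toChars c).map pvOrd := by
      unfold pvStep
      rw [if_pos hacc, foldl_snoc_map]
      rfl
    rw [h1, ih _ (by simp)]
    simp [List.flatMap_cons, List.append_assoc]

lemma digitChar_ord (m : Nat) (hm : m < 10) : pvOrd (Nat.digitChar m) = 48 + (m : Int) := by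
  interval_cases m <;> rfl

lemma pvDigitsNonneg_ge (n : Nat) (hn : ¬ n < 10) :
    pvDigitsNonneg n = pvDigitsNonneg (n / 10) ++ [48 + ((n % 10 : Nat) : Int)] := by
  rw [pvDigitsNonneg]
  exact if_neg hn

-- with enough fuel, toDigitsCore produces exactly pvDigitsNonneg's codes
lemma core_map :
    ∀ (fuel n : Nat) (ds : List Char), n < fuel →
      (Nat.toDigitsCore 10 fuel n ds).map pvOrd = pvDigitsNonneg n ++ ds.map pvOrd := by
  intro fuel
  induction fuel with
  | zero => intro n ds h; omega
  | succ f ih =>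
    intro n ds h
    simp only [Nat.toDigitsCore]
    by_cases h0 : n / 10 = 0
    · have hn : n < 10 := by omega
      rw [if_pos h0, pvDigitsNonneg, if_pos hn]
      simp [Nat.mod_eq_of_lt hn, digitChar_ord n hn]
    · have hn : ¬ n < 10 := by omega
      rw [if_neg h0]
      rw [ih (n / 10) (Nat.digitChar (n % 10) :: ds) (by omega)]
      rw [pvDigitsNonneg_ge n hn]
      simp [digitChar_ord (n % 10) (by omega), List.append_assoc]

lemma toChars_map_ord (n : Int) : (PySem.Int.toChars n).map pvOrd = pvDigits n := by
  unfold PySem.Int.toChars pvDigits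
  split
  · rename_i hn
    have hneg : (-n).toNat = n.natAbs := by omega
    simp only [List.map_cons, hneg, Nat.toDigits]
    rw [core_map (n.natAbs + 1) n.natAbs [] (by omega)]
    simp [pvOrd]
  · simp only [Nat.toDigits]
    rw [core_map (n.toNat + 1) n.toNat [] (by omega)]
    simp

-- A's output, characterised as a comma-join of pvDigits blocks
lemma encode_commands_char (c : Int) (cs : List Int) :
    encode_commands (c :: cs)
      = pvDigits c ++ (cs.flatMap (fun x => (44 : Int) :: pvDigits x) ++ [10]) := by
  unfold encode_commands
  simp only [List.foldl_cons]
  have hstep : (fun (output : List Int) (cmd : Int) =>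
      List.foldl (fun output ch => output ++ [((ch.toNat : Nat) : Int)])
        (if output ≠ [] then output ++ [((','.toNat : Nat) : Int)] else output)
        (PySem.Int.toChars cmd)) = pvStep := by
    funext o cmd
    unfold pvStep
    rw [show ((','.toNat : Nat) : Int) = (44 : Int) from by decide]
  rw [hstep]
  have h0 : List.foldl (fun output ch => output ++ [((ch.toNat : Nat) : Int)])
      (if ([] : List Int) ≠ [] then ([] : List Int) ++ [((','.toNat : Nat) : Int)] else [])
      (PySem.Int.toChars c) = (PySem.Int.toChars c).map pvOrd := by
    rw [if_neg (by simp), foldl_snoc_map]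
    rfl
  rw [h0, foldl_step_nonempty cs _ (by
    simpa [List.map_eq_nil_iff] using toChars_ne_nil c)]
  simp only [toChars_map_ord]
  have h10 : (('\n'.toNat : Nat) : Int) = (10 : Int) := by decide
  rw [h10, List.append_assoc]

-- ---- B-side characterisation ----

lemma pushLoop_eq : ∀ (n : Nat) (rev : List Int),
    pvPushLoop n rev = rev ++ (pvDigitsNonneg n).reverse := by
  intro n
  induction n using Nat.strong_induction_on with
  | _ n ih =>
    intro rev
    rw [pvPushLoop]
    by_cases h0 : n / 10 = 0
    · have hn : n < 10 := by omega
      rw [if_pos h0, pvDigitsNonneg, if_pos hn, Nat.mod_eq_of_lt hn]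
      simp
    · have hn : ¬ n < 10 := by omega
      rw [if_neg h0, ih (n / 10) (Nat.div_lt_self (by omega) (by norm_num)),
        pvDigitsNonneg_ge n hn]
      simp [List.append_assoc]

lemma pushDigitsRev_eq (rev : List Int) (n : Int) :
    pvPushDigitsRev rev n = rev ++ (pvDigits n).reverse := by
  unfold pvPushDigitsRev pvDigits
  by_cases hn : n < 0
  · rw [if_pos hn, if_pos hn, if_pos hn, pushLoop_eq]
    simp [List.append_assoc]
  · rw [if_neg hn, if_neg hn, if_neg hn, pushLoop_eq]

lemma fold_rev_eq : ∀ (cmds : List Int) (acc : List Int),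
    cmds.reverse.foldl (fun rev cmd => pvPushDigitsRev rev cmd ++ [44]) acc
      = acc ++ (cmds.flatMap (fun c => (44 : Int) :: pvDigits c)).reverse := by
  intro cmds
  induction cmds with
  | nil => intro acc; simp
  | cons c cs ih =>
    intro acc
    simp only [List.reverse_cons, List.foldl_append, List.foldl_cons, List.foldl_nil]
    rw [ih, pushDigitsRev_eq]
    simp [List.flatMap_cons, List.append_assoc]

theorem encode_commands_eq (commands : List Int) :
    encode_commands commands = encode_commands_alt commands := by
  cases commands with
  | nil => rfl
  | cons c cs =>
    rw [encode_commands_char]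
    simp only [encode_commands_alt, fold_rev_eq, ne_eq, reduceCtorEq, not_false_eq_true,
      if_true]
    simp only [List.flatMap_cons, List.reverse_cons, List.reverse_append, List.nil_append]
    have h : ([10] ++ ((cs.flatMap (fun x => (44 : Int) :: pvDigits x)).reverse
          ++ ((pvDigits c).reverse ++ [44])))
        = ((10 : Int) :: ((cs.flatMap (fun x => (44 : Int) :: pvDigits x)).reverse
          ++ (pvDigits c).reverse)) ++ [44] := by
      simp [List.append_assoc]
    rw [h, List.dropLast_concat]
    simp [List.append_assoc]

-- ===== VERDICT =====
theorem encode_commands_spec : Claim_equal_encode_commands := by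
  intro commands _
  exact encode_commands_eq commands
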